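-- pv_equiv track=rewrite | github.com/carlische/programming | src/lab4/people2.py | _validate_boundaries
-- ===== SOURCE A (Python) =====
-- from typing import List, Optional
--
-- def _validate_boundaries(boundaries: List[int]) -> bool:
--     """
--     Проверяет корректность границ возрастных групп.
--     """
--     previous = -1
--     for boundary in boundaries:
--         if not (0 < boundary <= 123):
--             return False
--         if boundary <= previous:
--             return False
--         previous = boundary
--     return True
-- ===== SOURCE B (Python) =====
-- from typing import List, Optional
--
-- def _validate_boundaries(boundaries: List[int]) -> bool:
--     # Strictly increasing  <=>  the list equals sorted(set(itself));
--     # then the range condition reduces to checking the two endpoints.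
--     if not boundaries:
--         return True
--     return (boundaries == sorted(set(boundaries))
--             and boundaries[0] > 0
--             and boundaries[-1] <= 123)
-- ===== Notes on version B (the rewrite author's own statement) =====
-- stated objective: alternative
-- what changed: Instead of scanning with a 'previous' sentinel and per-element range tests, B decides strict monotonicity by comparing the list against sorted(set(boundaries)) and then checks the range on the two endpoints only (first > 0, last <= 123), which suffices because the list is increasing.
import Mathlib
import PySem

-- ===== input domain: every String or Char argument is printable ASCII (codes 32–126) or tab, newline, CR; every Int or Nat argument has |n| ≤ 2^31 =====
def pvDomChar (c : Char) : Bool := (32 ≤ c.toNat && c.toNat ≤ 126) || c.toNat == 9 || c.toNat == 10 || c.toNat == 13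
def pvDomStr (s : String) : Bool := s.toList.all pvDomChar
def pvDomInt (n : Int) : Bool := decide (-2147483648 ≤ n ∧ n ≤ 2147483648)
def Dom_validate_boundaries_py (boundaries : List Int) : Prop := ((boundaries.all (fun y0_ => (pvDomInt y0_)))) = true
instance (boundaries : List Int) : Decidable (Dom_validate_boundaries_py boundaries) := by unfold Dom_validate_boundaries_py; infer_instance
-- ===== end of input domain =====

-- B decides strict monotonicity by comparing the list with sorted(set(boundaries)) and checks the range only at the two endpoints; same values as A's sentinel scan.
-- ===== PORT A =====
-- loop with early returns, threading `previous`
def pvGoA : Int → List Int → Bool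
  | _, [] => true
  | previous, boundary :: rest =>
    if ¬ (0 < boundary ∧ boundary ≤ 123) then false
    else if boundary ≤ previous then false
    else pvGoA boundary rest

def validate_boundaries_py (boundaries : List Int) : Bool := pvGoA (-1) boundaries

-- ===== PORT B =====
-- `boundaries[-1]` on the nonempty branch is the last element (getLast)
def validate_boundaries_py_alt (boundaries : List Int) : Bool :=
  match boundaries with
  | [] => true
  | b :: rest =>
    decide ((b :: rest) = PySem.List.sorted (PySem.Set.ofList (b :: rest)) (fun x => x) false)
    && decide (0 < b)
    && decide ((b :: rest).getLast (by simp) ≤ 123)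

-- ===== PRECONDITION & SPEC =====
def Spec_validate_boundaries_py (boundaries : List Int) (out : Bool) : Prop := out = validate_boundaries_py_alt boundaries
instance (boundaries : List Int) (out : Bool) : Decidable (Spec_validate_boundaries_py boundaries out) := by unfold Spec_validate_boundaries_py; infer_instance

-- ===== CLAIM (what is proved, stated in full; the proofs are below) =====
def Claim_equal_validate_boundaries_py : Prop := ∀ (boundaries : List Int), Dom_validate_boundaries_py boundaries → Spec_validate_boundaries_py boundaries (validate_boundaries_py boundaries)

-- ===== LEMMAS AND PROOFS =====

-- strict chain check starting from `prev` (A's loop stripped of the range test)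
def pvChainLt : Int → List Int → Bool
  | _, [] => true
  | prev, b :: rest => decide (prev < b) && pvChainLt b rest

-- chain from `prev` = strict pairwise on prev :: l  (< is transitive)
theorem pvChainLt_eq (l : List Int) : ∀ prev : Int,
    pvChainLt prev l = decide (List.Pairwise (fun a b : Int => a < b) (prev :: l)) := by
  induction l with
  | nil => intro prev; simp [pvChainLt]
  | cons b rest ih =>
    intro prev
    simp only [pvChainLt, ih b]
    by_cases hb : prev < b
    · by_cases hP : List.Pairwise (fun a b : Int => a < b) (b :: rest)
      · have hall : ∀ x ∈ b :: rest, prev < x := by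
          intro x hx
          rcases List.mem_cons.1 hx with rfl | hx'
          · exact hb
          · exact lt_trans hb ((List.pairwise_cons.1 hP).1 x hx')
        simp [hb, hP, List.pairwise_cons.2 ⟨hall, hP⟩]
      · have : ¬ List.Pairwise (fun a b : Int => a < b) (prev :: b :: rest) :=
          fun h => hP (List.pairwise_cons.1 h).2
        simp [hP, this]
    · have : ¬ List.Pairwise (fun a b : Int => a < b) (prev :: b :: rest) :=
        fun h => hb ((List.pairwise_cons.1 h).1 b (by simp))
      simp [hb, this]

-- A's loop = per-element range pass && strict chain starting at `prev`
theorem pvGoA_eq (l : List Int) : ∀ prev : Int,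
    pvGoA prev l = ((l.all fun b => decide (0 < b ∧ b ≤ 123)) && pvChainLt prev l) := by
  induction l with
  | nil => intro prev; simp [pvGoA, pvChainLt]
  | cons b rest ih =>
    intro prev
    simp only [pvGoA, pvChainLt, List.all_cons, ih]
    by_cases h1 : (0:Int) < b ∧ b ≤ 123
    · by_cases h3 : b ≤ prev
      · simp [h1, not_lt.2 h3]
      · have h3' : prev < b := lt_of_not_ge h3
        simp [h1, h3']
    · simp [h1]

-- l == sorted(set(l)) iff l is strictly increasing
theorem eq_sorted_ofList_iff (l : List Int) :
    (l = PySem.List.sorted (PySem.Set.ofList l) (fun x => x) false) ↔ l.Pairwise (· < ·) := by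
  constructor
  · intro h
    rw [h]
    exact PySem.List.sorted_ofList_pairwise_lt l
  · intro hp
    symm
    apply PySem.List.sorted_eq_of_perm_of_pairwise_lt
    · have hn : l.Nodup := hp.imp ne_of_lt
      exact (List.perm_ext_iff_of_nodup hn (PySem.Set.nodup_ofList l)).2
        (fun a => by simp [PySem.Set.mem_ofList])
    · exact hp

-- every element of a weakly increasing nonempty list is ≤ its last element
theorem le_getLast_of_pairwise : ∀ (l : List Int) (h : l ≠ []),
    l.Pairwise (· ≤ ·) → ∀ x ∈ l, x ≤ l.getLast h := by
  intro l
  induction l with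
  | nil => intro h; exact absurd rfl h
  | cons b rest ih =>
    intro _ hp x hx
    cases rest with
    | nil => simp at hx; simp [hx, List.getLast]
    | cons c r =>
      rw [List.getLast_cons (by simp)]
      rcases List.mem_cons.1 hx with rfl | hx'
      · exact le_trans ((List.pairwise_cons.1 hp).1 c (by simp))
          (ih (by simp) (List.pairwise_cons.1 hp).2 c (by simp))
      · exact ih (by simp) (List.pairwise_cons.1 hp).2 x hx'

-- ===== VERDICT (by name: the statement is the Claim_ definition above) =====
theorem validate_boundaries_py_spec : Claim_equal_validate_boundaries_py := by
  intro l _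
  unfold Spec_validate_boundaries_py validate_boundaries_py
  cases l with
  | nil => simp [pvGoA, validate_boundaries_py_alt]
  | cons b rest =>
    rw [pvGoA_eq, pvChainLt_eq]
    simp only [validate_boundaries_py_alt]
    rw [show (decide ((b :: rest) = PySem.List.sorted (PySem.Set.ofList (b :: rest)) (fun x => x) false))
        = decide ((b :: rest).Pairwise (· < ·)) from
      decide_eq_decide.2 (eq_sorted_ofList_iff (b :: rest))]
    rw [Bool.eq_iff_iff]
    simp only [Bool.and_eq_true, decide_eq_true_eq, List.all_eq_true]
    constructor
    · rintro ⟨hall, hchain⟩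
      have hp : (b :: rest).Pairwise (· < ·) := (List.pairwise_cons.1 hchain).2
      exact ⟨⟨hp, (hall b (by simp)).1⟩,
        (hall _ (List.getLast_mem (l := b :: rest) (by simp))).2⟩
    · rintro ⟨⟨hp, h0⟩, hL⟩
      have hlast := le_getLast_of_pairwise (b :: rest) (by simp) (hp.imp le_of_lt)
      have hall : ∀ x ∈ b :: rest, 0 < x ∧ x ≤ 123 := by
        intro x hx
        refine ⟨?_, le_trans (hlast x hx) hL⟩
        rcases List.mem_cons.1 hx with rfl | hx'
        · exact h0
        · exact lt_trans h0 ((List.pairwise_cons.1 hp).1 x hx')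
      refine ⟨hall, List.pairwise_cons.2 ⟨fun x hx => ?_, hp⟩⟩
      have := (hall x hx).1
      omega
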